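-- pv_equiv track=rewrite | github.com/michelmar/PO-232 | test.py | c_from_l
-- ===== SOURCE A (Python) =====
-- def c_from_l(previous_max,neighbors):
--   n  = len(neighbors)
--   neighbours_index = sorted(range(n), key=lambda k: neighbors[k])
--   neighbors.sort()
--   add = 1
--   c = [0 for i in range(0,n)]
--   c[neighbours_index[0]]=previous_max+add
--   for i in range(1,n):
--     if(neighbors[i-1] != neighbors[i]):
--       add = add + 1
--     c[neighbours_index[i]]=previous_max+add
--   return c
-- ===== SOURCE B (Python) =====
-- def c_from_l(previous_max, neighbors):
--     uniq = sorted(set(neighbors))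
--     c = [previous_max + 1 + uniq.index(v) for v in neighbors]
--     neighbors.sort()
--     return c
-- ===== Notes on version B (the rewrite author's own statement) =====
-- stated objective: simpler
-- what changed: Replaces A's argsort of indices plus an in-place array-writing loop carrying a running dense-rank counter with a direct per-element lookup: build uniq = sorted(set(neighbors)) once and map each element to previous_max + 1 + its position in uniq.
import Mathlib
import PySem

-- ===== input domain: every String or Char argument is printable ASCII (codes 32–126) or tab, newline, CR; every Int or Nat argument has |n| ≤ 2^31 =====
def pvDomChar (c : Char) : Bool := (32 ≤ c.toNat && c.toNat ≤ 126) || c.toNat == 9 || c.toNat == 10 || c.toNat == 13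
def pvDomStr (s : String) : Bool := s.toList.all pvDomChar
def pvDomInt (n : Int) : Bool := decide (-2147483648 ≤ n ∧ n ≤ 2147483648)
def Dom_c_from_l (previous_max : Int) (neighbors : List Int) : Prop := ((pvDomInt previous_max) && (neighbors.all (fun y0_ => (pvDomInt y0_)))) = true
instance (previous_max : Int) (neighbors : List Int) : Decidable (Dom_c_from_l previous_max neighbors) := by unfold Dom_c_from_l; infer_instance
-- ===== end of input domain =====

-- B replaces A's argsort + in-place rank-propagation loop by a direct per-element lookup in
-- sorted(set(neighbors)); equivalence is about the RETURN value (both Pythons also sort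
-- `neighbors` in place, identically).

-- ===== PORT A =====
-- A's loop body: update `add`, then write previous_max+add at position neighbours_index[i]
def pvStepA (previous_max : Int) (s idx : List Int) (st : Int × List Int) (i : Int) : Int × List Int :=
  let add := if PySem.List.pyGetD s (i-1) 0 ≠ PySem.List.pyGetD s i 0 then st.1 + 1 else st.1
  (add, PySem.List.pySetD st.2 (PySem.List.pyGetD idx i 0) (previous_max + add))

def c_from_l (previous_max : Int) (neighbors : List Int) : List Int :=
  let n := neighbors.length
  let neighbours_index := PySem.List.sorted (PySem.List.pyRange 0 n 1) (fun k => PySem.List.pyGetD neighbors k 0) false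
  let s := PySem.List.sorted neighbors (fun x => x) false   -- neighbors.sort() (in place in Python)
  let c0 := (PySem.List.pyRange 0 n 1).map (fun _ => (0 : Int))
  -- c[neighbours_index[0]] = previous_max + 1  (the IndexError on n = 0 is excluded by Pre_)
  let c1 := PySem.List.pySetD c0 (PySem.List.pyGetD neighbours_index 0 0) (previous_max + 1)
  ((PySem.List.pyRange 1 n 1).foldl (pvStepA previous_max s neighbours_index) (1, c1)).2

-- ===== PORT B =====
def c_from_l_alt (previous_max : Int) (neighbors : List Int) : List Int :=
  let uniq := PySem.List.sorted (PySem.Set.ofList neighbors) (fun x => x) false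
  -- uniq.index(v): v is always a member of uniq, so .index never raises; the getD default is never read
  neighbors.map (fun v => previous_max + 1 + (((PySem.List.index? uniq v).getD 0 : Nat) : Int))

-- ===== PRECONDITION & SPEC =====
-- Pre_ excludes exactly the empty list, on which A raises IndexError.
def Pre_c_from_l (previous_max : Int) (neighbors : List Int) : Prop := neighbors ≠ []
instance (previous_max : Int) (neighbors : List Int) : Decidable (Pre_c_from_l previous_max neighbors) := by unfold Pre_c_from_l; infer_instance
def pvWitness_c_from_l : Int × List Int := (5, [3, 1, 3])

def Spec_c_from_l (previous_max : Int) (neighbors : List Int) (out : List Int) : Prop := out = c_from_l_alt previous_max neighbors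
instance (previous_max : Int) (neighbors : List Int) (out : List Int) : Decidable (Spec_c_from_l previous_max neighbors out) := by unfold Spec_c_from_l; infer_instance

-- ===== CLAIM (what is proved, stated in full; the proofs are below) =====
def Claim_equal_c_from_l : Prop := ∀ (previous_max : Int) (neighbors : List Int), Dom_c_from_l previous_max neighbors → Pre_c_from_l previous_max neighbors → Spec_c_from_l previous_max neighbors (c_from_l previous_max neighbors)

-- ===== LEMMAS AND PROOFS =====

-- proof-only abbreviations for the objects the two ports build
def pvG (ns : List Int) (k : Int) : Int := PySem.List.pyGetD ns k 0
def pvS (ns : List Int) : List Int := PySem.List.sorted ns (fun x => x) false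
def pvIdx (ns : List Int) : List Int := PySem.List.sorted (PySem.List.pyRange 0 ns.length 1) (fun k => pvG ns k) false
def pvU (ns : List Int) : List Int := PySem.List.sorted (PySem.Set.ofList ns) (fun x => x) false
def pvRank (ns : List Int) (v : Int) : Int := (((PySem.List.index? (pvU ns) v).getD 0 : Nat) : Int)

def pvF (pm : Int) (ns : List Int) (v : Int) : Int := pm + 1 + pvRank ns v
def pvWr (pm : Int) (ns : List Int) (c : List Int) (p : Int) : List Int :=
  PySem.List.pySetD c p (pvF pm ns (pvG ns p))


-- in a strictly increasing list, the index of b is one past the index of a when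
-- a < b and no member lies strictly between them
theorem pvAdjIndex (u : List Int) (hu : u.Pairwise (· < ·)) (a b : Int) (ha : a ∈ u) (hb : b ∈ u)
    (hab : a < b) (hno : ∀ x ∈ u, ¬(a < x ∧ x < b)) :
    PySem.List.index? u b = Option.map (· + 1) (PySem.List.index? u a) := by
  induction u with
  | nil => cases ha
  | cons h t ih =>
    have hu' := (List.pairwise_cons.mp hu)
    by_cases hha : h = a
    · subst hha
      have hbt : b ∈ t := by
        cases hb with
        | head => exact absurd rfl (ne_of_gt hab)
        | tail _ h' => exact h'
      cases t with
      | nil => cases hbt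
      | cons t0 tt =>
        have ht0 : h < t0 := hu'.1 t0 List.mem_cons_self
        have hbe : b = t0 := by
          rcases List.mem_cons.mp hbt with h1 | h1
          · exact h1
          · have := (List.pairwise_cons.mp hu'.2).1 b h1
            have := hno t0 (List.mem_cons_of_mem _ List.mem_cons_self)
            omega
        subst hbe
        rw [PySem.List.index?_cons_of_ne (b::tt) (ne_of_lt hab), PySem.List.index?_cons_self,
            PySem.List.index?_cons_self]
    · have hat : a ∈ t := by
        cases ha with
        | head => exact absurd rfl (fun h => hha h.symm)
        | tail _ h' => exact h'
      have hhb : h ≠ b := by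
        have := hu'.1 a hat
        omega
      rw [PySem.List.index?_cons_of_ne _ hhb, PySem.List.index?_cons_of_ne _ (fun h => hha h),
          ih hu'.2 hat (by
            cases hb with
            | head => exact absurd rfl hhb
            | tail _ h' => exact h') (fun x hx => hno x (List.mem_cons_of_mem _ hx))]

theorem pvU_mem (ns : List Int) (x : Int) : x ∈ pvU ns ↔ x ∈ ns := by
  unfold pvU
  rw [PySem.List.mem_sorted, PySem.Set.mem_ofList]

theorem pvS_mem (ns : List Int) (x : Int) : x ∈ pvS ns ↔ x ∈ ns := by
  unfold pvS
  rw [PySem.List.mem_sorted]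


-- sorted(set(ns)) and sorted(ns) start with the same (minimal) element
theorem pvRank_zero (ns : List Int) (h : ns ≠ []) : pvRank ns ((pvS ns).getD 0 0) = 0 := by
  have hslen : (pvS ns).length = ns.length := PySem.List.length_sorted ..
  have hlen : 0 < ns.length := List.length_pos_iff.mpr h
  obtain ⟨s0, st, hs⟩ : ∃ s0 st, pvS ns = s0 :: st := by
    cases hse : pvS ns with
    | nil => rw [hse] at hslen; simp at hslen; omega
    | cons x xs => exact ⟨x, xs, rfl⟩
  have hs0 : s0 ∈ ns := (pvS_mem ns s0).mp (hs ▸ List.mem_cons_self)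
  obtain ⟨u0, ut, hu⟩ : ∃ u0 ut, pvU ns = u0 :: ut := by
    cases hue : pvU ns with
    | nil => have := (pvU_mem ns s0).mpr hs0; rw [hue] at this; cases this
    | cons x xs => exact ⟨x, xs, rfl⟩
  have hu0 : u0 ∈ ns := (pvU_mem ns u0).mp (hu ▸ List.mem_cons_self)
  have h1 : s0 ≤ u0 := PySem.List.key_head_sorted_le ns (fun x => x) hs u0 hu0
  have h2 : u0 ≤ s0 := PySem.List.key_head_sorted_le (PySem.Set.ofList ns) (fun x => x) hu s0
    ((PySem.Set.mem_ofList ns s0).mpr hs0)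
  have : u0 = s0 := le_antisymm h2 h1
  unfold pvRank
  rw [hs, hu, List.getD_cons_zero, this, PySem.List.index?_cons_self]
  rfl

theorem pvS_monotone (ns : List Int) (i j : Nat) (hi : i < (pvS ns).length) (hj : j < (pvS ns).length)
    (hij : i ≤ j) : (pvS ns)[i] ≤ (pvS ns)[j] := by
  rcases Nat.lt_or_ge i j with h | h
  · exact List.pairwise_iff_getElem.mp (PySem.List.sorted_pairwise ns (fun x => x)) i j hi hj h
  · have : i = j := le_antisymm hij h
    subst this; exact le_refl _


-- the dense rank increases by exactly 1 at each change of value in the sorted list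
theorem pvRank_step (ns : List Int) (i : Nat) (h : i + 1 < ns.length) :
    pvRank ns ((pvS ns).getD (i+1) 0) =
      pvRank ns ((pvS ns).getD i 0) + (if (pvS ns).getD i 0 ≠ (pvS ns).getD (i+1) 0 then 1 else 0) := by
  have hslen : (pvS ns).length = ns.length := PySem.List.length_sorted ..
  have hi : i < (pvS ns).length := by omega
  have hi1 : i + 1 < (pvS ns).length := by omega
  rw [List.getD_eq_getElem _ _ hi, List.getD_eq_getElem _ _ hi1]
  set a := (pvS ns)[i] with hadef
  set b := (pvS ns)[i+1] with hbdef
  have hab : a ≤ b := pvS_monotone ns i (i+1) hi hi1 (by omega)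
  by_cases he : a = b
  · simp [he]
  · have hab' : a < b := lt_of_le_of_ne hab he
    have hno : ∀ x ∈ pvU ns, ¬(a < x ∧ x < b) := by
      intro x hx ⟨h1, h2⟩
      have hxs : x ∈ pvS ns := (pvS_mem ns x).mpr ((pvU_mem ns x).mp hx)
      obtain ⟨t, ht, hxe⟩ := List.mem_iff_getElem.mp hxs
      rcases Nat.lt_or_ge t (i+1) with hcase | hcase
      · have := pvS_monotone ns t i (by omega) hi (by omega)
        omega
      · have := pvS_monotone ns (i+1) t hi1 (by omega) (by omega)
        omega
    have hau : a ∈ pvU ns := (pvU_mem ns a).mpr ((pvS_mem ns a).mp (List.getElem_mem hi))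
    have hbu : b ∈ pvU ns := (pvU_mem ns b).mpr ((pvS_mem ns b).mp (List.getElem_mem hi1))
    have hadj := pvAdjIndex (pvU ns) (PySem.List.sorted_ofList_pairwise_lt ns) a b hau hbu hab' hno
    obtain ⟨r, hr⟩ := Option.isSome_iff_exists.mp ((PySem.List.index?_isSome_iff _ _).mpr hau)
    unfold pvRank
    rw [hadj, hr]
    simp only [Option.map_some, Option.getD_some, if_pos he]
    push_cast
    ring

-- sorted(ns) is the argsort permutation applied to ns
theorem pvS_eq_map (ns : List Int) : pvS ns = (pvIdx ns).map (pvG ns) := by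
  have hperm : ((pvIdx ns).map (pvG ns)).Perm ns := by
    have h1 : (pvIdx ns).Perm (PySem.List.pyRange 0 ns.length 1) := PySem.List.sorted_perm ..
    have h2 := h1.map (pvG ns)
    rwa [show (PySem.List.pyRange 0 ns.length 1).map (pvG ns) = ns from PySem.List.map_pyGetD_pyRange_zero ns 0] at h2
  have hpair : ((pvIdx ns).map (pvG ns)).Pairwise (· ≤ ·) := by
    have := PySem.List.sorted_pairwise (xs := PySem.List.pyRange 0 ns.length 1) (key := fun k => pvG ns k)
    exact List.Pairwise.map _ (fun a b h => h) this
  exact PySem.List.sorted_id_eq_of_perm_of_pairwise _ _ hperm hpair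

theorem pvIdx_length (ns : List Int) : (pvIdx ns).length = ns.length := by
  unfold pvIdx
  rw [PySem.List.length_sorted]
  simp [pysem]


-- A's loop, started at i with the correct running `add`, performs exactly the writes
-- `position idx[t] ← previous_max + 1 + rank` for t = i .. n-1
theorem pvLoop (pm : Int) (ns : List Int) : ∀ (k i : Nat), i + k = ns.length → 1 ≤ i → ∀ (c : List Int),
    ((PySem.List.pyRange (i : Int) ns.length 1).foldl (pvStepA pm (pvS ns) (pvIdx ns))
        (1 + pvRank ns ((pvS ns).getD (i-1) 0), c)).2
      = ((pvIdx ns).drop i).foldl (pvWr pm ns) c := by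
  intro k
  induction k with
  | zero =>
    intro i hik hi c
    have h1 : PySem.List.pyRange (i : Int) ns.length 1 = [] := by
      simp [PySem.List.pyRange]; omega
    have h2 : (pvIdx ns).drop i = [] := by
      rw [List.drop_eq_nil_iff]
      rw [pvIdx_length]; omega
    rw [h1, h2]
    rfl
  | succ k ih =>
    intro i hik hi c
    have hilt : i < ns.length := by omega
    have hidx : i < (pvIdx ns).length := by rw [pvIdx_length]; omega
    have hs : i < (pvS ns).length := by unfold pvS; rw [PySem.List.length_sorted]; omega
    have h1 : PySem.List.pyRange (i : Int) ns.length 1 = (i : Int) :: PySem.List.pyRange ((i : Int) + 1) ns.length 1 := by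
      exact PySem.List.pyRange_one_cons (by exact_mod_cast hilt)
    rw [h1, List.foldl_cons]
    have hstep : pvStepA pm (pvS ns) (pvIdx ns) (1 + pvRank ns ((pvS ns).getD (i-1) 0), c) (i : Int)
        = (1 + pvRank ns ((pvS ns).getD i 0), pvWr pm ns c ((pvIdx ns).getD i 0)) := by
      unfold pvStepA
      have hc1 : (i : Int) - 1 = ((i - 1 : Nat) : Int) := by omega
      rw [hc1, PySem.List.pyGetD_natCast, PySem.List.pyGetD_natCast, PySem.List.pyGetD_natCast]
      have hrs := pvRank_step ns (i-1) (by omega)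
      have hi1 : i - 1 + 1 = i := by omega
      rw [hi1] at hrs
      have hadd : (if (pvS ns).getD (i-1) 0 ≠ (pvS ns).getD i 0 then 1 + pvRank ns ((pvS ns).getD (i-1) 0) + 1
            else 1 + pvRank ns ((pvS ns).getD (i-1) 0)) = 1 + pvRank ns ((pvS ns).getD i 0) := by
        split_ifs with hne
        · rw [hrs, if_pos hne]; ring
        · rw [hrs, if_neg hne]; ring
      simp only []
      rw [hadd]
      have hval : pm + (1 + pvRank ns ((pvS ns).getD i 0)) = pvF pm ns (pvG ns ((pvIdx ns).getD i 0)) := by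
        have : (pvS ns).getD i 0 = pvG ns ((pvIdx ns).getD i 0) := by
          rw [List.getD_eq_getElem _ _ hs, List.getD_eq_getElem _ _ hidx,
              List.getElem_of_eq (pvS_eq_map ns) hs, List.getElem_map]
        rw [this]
        unfold pvF
        ring
      rw [pvWr, hval]
    rw [hstep]
    have hcast : ((i : Int) + 1) = ((i + 1 : Nat) : Int) := by push_cast; ring
    have hpred : (i + 1) - 1 = i := by omega
    have := ih (i + 1) (by omega) (by omega) (pvWr pm ns c ((pvIdx ns).getD i 0))
    rw [hpred] at this
    rw [hcast, this]
    rw [List.drop_eq_getElem_cons hidx, List.foldl_cons, List.getD_eq_getElem _ _ hidx]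


-- applying those writes over any index list covering 0..n-1 yields the rank table
theorem pvWrites (pm : Int) (ns : List Int) : ∀ (ps c : List Int),
    (∀ p ∈ ps, 0 ≤ p ∧ p < ns.length) → c.length = ns.length →
    (∀ j : Nat, j < ns.length → ((j : Int) ∈ ps ∨ c.getD j 0 = pvF pm ns (pvG ns j))) →
    (ps.foldl (pvWr pm ns) c).length = ns.length ∧
      ∀ j : Nat, j < ns.length → (ps.foldl (pvWr pm ns) c).getD j 0 = pvF pm ns (pvG ns j) := by
  intro ps
  induction ps with
  | nil =>
    intro c _ hlen hinv
    refine ⟨hlen, fun j hj => ?_⟩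
    rcases hinv j hj with h | h
    · cases h
    · exact h
  | cons p ps ih =>
    intro c hbd hlen hinv
    have hp := hbd p List.mem_cons_self
    have hset : pvWr pm ns c p = c.set p.toNat (pvF pm ns (pvG ns p)) := by
      rw [pvWr, PySem.List.pySetD_of_nonneg _ _ hp.1]
    have hlen' : (pvWr pm ns c p).length = ns.length := by
      rw [hset, List.length_set, hlen]
    rw [List.foldl_cons]
    apply ih (pvWr pm ns c p) (fun q hq => hbd q (List.mem_cons_of_mem _ hq)) hlen'
    intro j hj
    by_cases hjp : (j : Int) = p
    · right
      have hjn : p.toNat = j := by omega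
      rw [hset, List.getD_eq_getElem _ _ (by rw [List.length_set, hlen]; omega),
          List.getElem_set, if_pos hjn, hjp]
    · rcases hinv j hj with h | h
      · rcases List.mem_cons.mp h with h' | h'
        · exact absurd h' hjp
        · left; exact h'
      · right
        rw [hset, List.getD_eq_getElem _ _ (by rw [List.length_set, hlen]; omega),
            List.getElem_set, if_neg (by omega), ← List.getD_eq_getElem _ 0 (by omega)]
        exact h

theorem final_assembly (pm : Int) (ns : List Int) (hne : ns ≠ []) : c_from_l pm ns = c_from_l_alt pm ns := by
  have hn : 0 < ns.length := List.length_pos_iff.mpr hne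
  have hidx0 : 0 < (pvIdx ns).length := by rw [pvIdx_length]; omega
  have hs0 : 0 < (pvS ns).length := by unfold pvS; rw [PySem.List.length_sorted]; omega
  have hc0len : ((PySem.List.pyRange 0 ns.length 1).map (fun _ => (0 : Int))).length = ns.length := by
    simp [pysem]
  set c0 := (PySem.List.pyRange 0 ns.length 1).map (fun _ => (0 : Int)) with hc0
  have hrank0 : pvRank ns ((pvS ns).getD 0 0) = 0 := pvRank_zero ns hne
  have hc1 : PySem.List.pySetD c0 (PySem.List.pyGetD (pvIdx ns) 0 0) (pm + 1)
      = pvWr pm ns c0 ((pvIdx ns).getD 0 0) := by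
    rw [PySem.List.pyGetD_zero, pvWr]
    have hg : pvG ns ((pvIdx ns).getD 0 0) = (pvS ns).getD 0 0 := by
      rw [List.getD_eq_getElem _ _ hidx0, List.getD_eq_getElem _ _ hs0,
          List.getElem_of_eq (pvS_eq_map ns) hs0, List.getElem_map]
    rw [hg, pvF, hrank0]
    norm_num
  have hA : c_from_l pm ns
      = ((PySem.List.pyRange 1 ns.length 1).foldl (pvStepA pm (pvS ns) (pvIdx ns))
          (1, PySem.List.pySetD c0 (PySem.List.pyGetD (pvIdx ns) 0 0) (pm + 1))).2 := rfl
  have hstate1 : ((1 : Int), pvWr pm ns c0 ((pvIdx ns).getD 0 0))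
      = (1 + pvRank ns ((pvS ns).getD ((1:Nat)-1) 0), pvWr pm ns c0 ((pvIdx ns).getD 0 0)) := by
    show ((1 : Int), _) = (1 + pvRank ns ((pvS ns).getD 0 0), _)
    rw [hrank0]
    norm_num
  have hloop := pvLoop pm ns (ns.length - 1) 1 (by omega) (by omega)
      (pvWr pm ns c0 ((pvIdx ns).getD 0 0))
  rw [Nat.cast_one] at hloop
  have hcons : pvIdx ns = (pvIdx ns)[0] :: (pvIdx ns).drop 1 := List.drop_eq_getElem_cons hidx0
  have hAport : c_from_l pm ns = ((pvIdx ns).foldl (pvWr pm ns) c0) := by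
    rw [hA, hc1, hstate1, hloop]
    conv_rhs => rw [hcons]
    rw [List.foldl_cons, List.getD_eq_getElem _ _ hidx0]
  have hW := pvWrites pm ns (pvIdx ns) c0
    (fun p hp => by
      have h1 := (PySem.List.mem_sorted _ _ _ p).mp hp
      have h2 := PySem.List.mem_pyRange_one.mp h1
      exact ⟨h2.1, h2.2⟩)
    hc0len
    (fun j hj => Or.inl ((PySem.List.mem_sorted _ _ _ _).mpr
      (PySem.List.mem_pyRange_one.mpr ⟨by omega, by exact_mod_cast hj⟩)))
  have hB : c_from_l_alt pm ns = ns.map (pvF pm ns) := rfl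
  rw [hAport, hB]
  apply List.ext_getElem
  · rw [hW.1, List.length_map]
  · intro j hj1 hj2
    have hjn : j < ns.length := by rw [hW.1] at hj1; exact hj1
    have hv := hW.2 j hjn
    rw [List.getD_eq_getElem _ _ hj1] at hv
    rw [hv, List.getElem_map]
    congr 1
    rw [pvG, PySem.List.pyGetD_natCast, List.getD_eq_getElem _ _ hjn]

-- ===== VERDICT (by name: the statement is the Claim_ definition above) =====
theorem c_from_l_spec : Claim_equal_c_from_l := by
  intro pm ns _ hne
  unfold Spec_c_from_l
  exact final_assembly pm ns hne
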